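-- pv_equiv track=rewrite | github.com/boscoh/inmembrane | inmembrane/protocols/gram_pos.py | eval_surface_exposed_loop
-- ===== SOURCE A (Python) =====
-- def eval_surface_exposed_loop(
--         sequence_length, n_transmembrane_region, outer_loops,
--         terminal_exposed_loop_min, internal_exposed_loop_min):
--     """
--     This is the key algorithm in SurfG+ to identify Potentially Surface
--     Exposed proteins. It evaluates all loops that poke out of the periplasmic
--     side of the Gram+ bacterial membrane and tests if the loops are long
--     enough to stick out of the peptidoglycan layer to be cleaved by proteases
--     in a cell-shaving experiment.
--
--     Returns True if any outer loop, or the N- or C-terminii are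
--     longer than the given thresholds.
--     """
--
--     outer_loops = outer_loops[:]
--
--     if n_transmembrane_region == 0:
--         # treat protein as one entire exposed loop
--         return sequence_length >= terminal_exposed_loop_min
--
--     if not outer_loops:
--         return False
--
--     loop_len = lambda loop: abs(loop[1] - loop[0]) + 1
--
--     # if the N-terminal loop sticks outside
--     if outer_loops[0][0] == 1:
--         nterminal_loop = outer_loops[0]
--         del outer_loops[0]
--         if loop_len(nterminal_loop) >= terminal_exposed_loop_min:
--             return True
--
--     # if the C-terminal loop sticks outside
--     if outer_loops:
--         if outer_loops[-1][-1] == sequence_length: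
--             cterminal_loop = outer_loops[-1]
--             del outer_loops[-1]
--             if loop_len(cterminal_loop) >= terminal_exposed_loop_min:
--                 return True
--
--     # test remaining outer loops for length
--     for loop in outer_loops:
--         if loop_len(loop) >= internal_exposed_loop_min:
--             return True
--
--     return False
-- ===== SOURCE B (Python) =====
-- def eval_surface_exposed_loop(
--         sequence_length, n_transmembrane_region, outer_loops,
--         terminal_exposed_loop_min, internal_exposed_loop_min):
--     if n_transmembrane_region == 0:
--         return sequence_length >= terminal_exposed_loop_min
--
--     def go(loops, at_start):
--         if not loops:
--             return False
--         (a, b), rest = loops[0], loops[1:]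
--         if at_start and a == 1:
--             thr = terminal_exposed_loop_min
--         elif not rest and b == sequence_length:
--             thr = terminal_exposed_loop_min
--         else:
--             thr = internal_exposed_loop_min
--         return abs(b - a) + 1 >= thr or go(rest, False)
--
--     return go(outer_loops, True)
-- ===== Notes on version B (the rewrite author's own statement) =====
-- stated objective: simpler
-- what changed: Replaced A's staged mutate-and-early-return flow (delete N-terminal head, pre-check last element, then a separate loop) with one forward recursion over the list carrying an at-start flag that picks each loop's threshold in place (C-terminal detected when the tail is empty), so no list mutation, slicing or separate terminal passes remain.
import Mathlib
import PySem

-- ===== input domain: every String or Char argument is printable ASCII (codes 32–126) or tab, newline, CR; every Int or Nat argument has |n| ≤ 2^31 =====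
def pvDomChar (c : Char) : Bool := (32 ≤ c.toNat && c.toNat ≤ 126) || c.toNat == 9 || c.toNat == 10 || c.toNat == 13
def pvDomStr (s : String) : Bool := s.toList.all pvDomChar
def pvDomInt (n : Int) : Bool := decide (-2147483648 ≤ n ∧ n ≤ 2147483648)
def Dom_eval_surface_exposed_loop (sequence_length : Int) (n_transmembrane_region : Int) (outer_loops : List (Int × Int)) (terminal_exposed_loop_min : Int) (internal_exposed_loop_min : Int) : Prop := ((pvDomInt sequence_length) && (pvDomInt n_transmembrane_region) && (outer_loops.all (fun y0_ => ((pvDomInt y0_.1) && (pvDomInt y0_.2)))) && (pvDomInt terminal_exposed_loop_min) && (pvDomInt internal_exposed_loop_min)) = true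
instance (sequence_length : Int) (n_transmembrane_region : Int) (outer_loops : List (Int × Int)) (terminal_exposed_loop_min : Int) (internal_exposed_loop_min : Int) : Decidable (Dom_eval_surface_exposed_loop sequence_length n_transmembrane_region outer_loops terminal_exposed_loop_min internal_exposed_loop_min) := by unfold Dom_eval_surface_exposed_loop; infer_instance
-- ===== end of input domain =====

-- ===== PORT A =====
-- B: one forward recursion with an at-start flag replaces A's staged delete/pre-check/loop flow (simpler; same cost).

-- loop_len lambda of A
def pvLoopLen (l : Int × Int) : Int := |l.2 - l.1| + 1

-- A's final 'for loop in outer_loops: if … return True' loop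
def pvForLoops (internal_exposed_loop_min : Int) : List (Int × Int) → Bool
  | [] => false
  | l :: rest =>
    if pvLoopLen l ≥ internal_exposed_loop_min then true
    else pvForLoops internal_exposed_loop_min rest

-- A's code from the C-terminal check onwards, on the list remaining after the N-terminal step
def pvAfterN (sequence_length terminal_exposed_loop_min internal_exposed_loop_min : Int)
    (ol : List (Int × Int)) : Bool :=
  match ol.getLast? with
  | none => pvForLoops internal_exposed_loop_min ol
  | some last =>
    if last.2 = sequence_length then
      if pvLoopLen last ≥ terminal_exposed_loop_min then true
      else pvForLoops internal_exposed_loop_min ol.dropLast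
    else pvForLoops internal_exposed_loop_min ol

def eval_surface_exposed_loop (sequence_length : Int) (n_transmembrane_region : Int) (outer_loops : List (Int × Int)) (terminal_exposed_loop_min : Int) (internal_exposed_loop_min : Int) : Bool :=
  if n_transmembrane_region = 0 then sequence_length ≥ terminal_exposed_loop_min
  else
    match outer_loops with
    | [] => false
    | first :: rest =>
      if first.1 = 1 then
        if pvLoopLen first ≥ terminal_exposed_loop_min then true
        else pvAfterN sequence_length terminal_exposed_loop_min internal_exposed_loop_min rest
      else pvAfterN sequence_length terminal_exposed_loop_min internal_exposed_loop_min (first :: rest)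

-- ===== PORT B =====
-- B's inner recursive helper 'go': threshold chosen positionally per element
def pvGo (sequence_length terminal_exposed_loop_min internal_exposed_loop_min : Int) :
    Bool → List (Int × Int) → Bool
  | _, [] => false
  | atStart, (a, b) :: rest =>
    let thr :=
      if atStart = true ∧ a = 1 then terminal_exposed_loop_min
      else if rest = [] ∧ b = sequence_length then terminal_exposed_loop_min
      else internal_exposed_loop_min
    decide (|b - a| + 1 ≥ thr) ||
      pvGo sequence_length terminal_exposed_loop_min internal_exposed_loop_min false rest

def eval_surface_exposed_loop_alt (sequence_length : Int) (n_transmembrane_region : Int) (outer_loops : List (Int × Int)) (terminal_exposed_loop_min : Int) (internal_exposed_loop_min : Int) : Bool :=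
  if n_transmembrane_region = 0 then sequence_length ≥ terminal_exposed_loop_min
  else pvGo sequence_length terminal_exposed_loop_min internal_exposed_loop_min true outer_loops

-- ===== PRECONDITION & SPEC =====
def Spec_eval_surface_exposed_loop (sequence_length : Int) (n_transmembrane_region : Int) (outer_loops : List (Int × Int)) (terminal_exposed_loop_min : Int) (internal_exposed_loop_min : Int) (out : Bool) : Prop := out = eval_surface_exposed_loop_alt sequence_length n_transmembrane_region outer_loops terminal_exposed_loop_min internal_exposed_loop_min
instance (sequence_length : Int) (n_transmembrane_region : Int) (outer_loops : List (Int × Int)) (terminal_exposed_loop_min : Int) (internal_exposed_loop_min : Int) (out : Bool) : Decidable (Spec_eval_surface_exposed_loop sequence_length n_transmembrane_region outer_loops terminal_exposed_loop_min internal_exposed_loop_min out) := by unfold Spec_eval_surface_exposed_loop; infer_instance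

-- ===== CLAIM (what is proved, stated in full; the proofs are below) =====
def Claim_equal_eval_surface_exposed_loop : Prop := ∀ (sequence_length : Int) (n_transmembrane_region : Int) (outer_loops : List (Int × Int)) (terminal_exposed_loop_min : Int) (internal_exposed_loop_min : Int), Dom_eval_surface_exposed_loop sequence_length n_transmembrane_region outer_loops terminal_exposed_loop_min internal_exposed_loop_min → Spec_eval_surface_exposed_loop sequence_length n_transmembrane_region outer_loops terminal_exposed_loop_min internal_exposed_loop_min (eval_surface_exposed_loop sequence_length n_transmembrane_region outer_loops terminal_exposed_loop_min internal_exposed_loop_min)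

-- ===== LEMMAS AND PROOFS =====

-- B's helper with the flag down computes exactly A's post-N-terminal phase
theorem pvGo_false_eq_afterN (sl tmin imin : Int) (ol : List (Int × Int)) :
    pvGo sl tmin imin false ol = pvAfterN sl tmin imin ol := by
  induction ol with
  | nil => rfl
  | cons hd rest ih =>
    obtain ⟨a, b⟩ := hd
    cases rest with
    | nil =>
      by_cases hc : b = sl <;>
        simp [pvGo, pvAfterN, pvForLoops, pvLoopLen, hc, Bool.or_comm]
    | cons r rs =>
      cases hl : (r :: rs).getLast? with
      | none => simp at hl
      | some last =>
        by_cases hc : last.2 = sl <;>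
          by_cases ht : pvLoopLen last ≥ tmin <;>
            simp_all [pvGo, pvAfterN, pvForLoops, pvLoopLen, List.getLast?_cons_cons,
              List.dropLast, Bool.or_assoc, Bool.or_comm, Bool.or_left_comm]

theorem eval_surface_exposed_loop_spec : Claim_equal_eval_surface_exposed_loop := by
  intro sl ntm ol tmin imin _
  unfold Spec_eval_surface_exposed_loop
  by_cases h0 : ntm = 0
  · simp [eval_surface_exposed_loop, eval_surface_exposed_loop_alt, h0]
  cases ol with
  | nil => simp [eval_surface_exposed_loop, eval_surface_exposed_loop_alt, h0, pvGo]
  | cons first rest =>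
    obtain ⟨a, b⟩ := first
    by_cases h1 : a = 1
    · -- B's at-start branch fires with threshold tmin, matching A's N-terminal step
      by_cases hl : pvLoopLen (a, b) ≥ tmin <;>
        simp_all [eval_surface_exposed_loop, eval_surface_exposed_loop_alt,
          pvGo, pvLoopLen, pvGo_false_eq_afterN]
    · -- no N-terminal consumption: B's flag condition is vacuous, reduce to the flag-down lemma
      have hgo : pvGo sl tmin imin true ((a, b) :: rest) =
          pvGo sl tmin imin false ((a, b) :: rest) := by
        simp [pvGo, h1]
      simp [eval_surface_exposed_loop, eval_surface_exposed_loop_alt, h0, h1, hgo,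
        pvGo_false_eq_afterN]
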